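-- pv_equiv track=rewrite | github.com/FrancoVigier/Naive-MatchCouple | main.py | conquistar
-- ===== SOURCE A (Python) =====
-- def matchea(persona, pretendiente):
--     _, _, persona_localidad, persona_edad, persona_genero, persona_generoDeInteres = persona
--     _, _, pretendiente_localidad, pretendiente_edad, pretendiente_genero, pretendiente_generoDeInteres = pretendiente
--
--     return pretendiente_localidad == persona_localidad \
--            and (persona_generoDeInteres == "A" or pretendiente_genero == persona_generoDeInteres) \
--            and (pretendiente_generoDeInteres == "A" or persona_genero == pretendiente_generoDeInteres) \
--            and ((persona_edad >= 18 and pretendiente_edad >= 18) or (persona_edad < 18 and pretendiente_edad < 18))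
--
-- def conquistar(divididos):
--     segregados, parejas, personasEmparejables = divididos
--
--     while personasEmparejables:
--         persona = personasEmparejables.pop(0)
--
--         matcheado = False
--         for (i, candidato) in enumerate(personasEmparejables):
--             if matchea(persona, candidato):
--                 personasEmparejables.pop(i)
--                 parejas.append((persona, candidato))
--                 matcheado = True
--                 break
--
--         if not matcheado:
--             segregados.append(persona)
--
--     return segregados, parejas
-- ===== SOURCE B (Python) =====
-- def _compatible(persona, candidato):
--     _, _, p_loc, p_edad, p_gen, p_gdi = persona
--     _, _, c_loc, c_edad, c_gen, c_gdi = candidato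
--     return (c_loc == p_loc
--             and (p_gdi == "A" or c_gen == p_gdi)
--             and (c_gdi == "A" or p_gen == c_gdi)
--             and ((p_edad >= 18) == (c_edad >= 18)))
--
--
-- def conquistar(divididos):
--     # Two staged passes instead of A's destructive while-loop: pass 1 scans the
--     # people non-destructively with a per-cell 'used' flag and records an event
--     # (p, partner-or-None) per unconsumed person; pass 2 splits the event list
--     # into segregados and parejas.  A empties personasEmparejables in place; B
--     # does not (return value is the same).
--     segregados, parejas, personas = divididos
--     tagged = [[p, False] for p in personas]
--     events = []
--     for k in range(len(tagged)):
--         p, used = tagged[k]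
--         if used:
--             continue
--         partner = None
--         for cell in tagged[k + 1:]:
--             if not cell[1] and _compatible(p, cell[0]):
--                 cell[1] = True
--                 partner = cell[0]
--                 break
--         events.append((p, partner))
--     for p, q in events:
--         if q is None:
--             segregados.append(p)
--         else:
--             parejas.append((p, q))
--     return segregados, parejas
-- ===== Notes on version B (the rewrite author's own statement) =====
-- stated objective: alternative
-- what changed: B replaces A's destructive while-loop (pop the front, pop the matched candidate out of the shrinking list, append to the outputs as it goes) by two staged passes: a non-destructive scan with a per-cell used flag that records one (person, partner-or-None) event per consumed person, then a second pass that splits the event list into segregados and parejas.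
import Mathlib
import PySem

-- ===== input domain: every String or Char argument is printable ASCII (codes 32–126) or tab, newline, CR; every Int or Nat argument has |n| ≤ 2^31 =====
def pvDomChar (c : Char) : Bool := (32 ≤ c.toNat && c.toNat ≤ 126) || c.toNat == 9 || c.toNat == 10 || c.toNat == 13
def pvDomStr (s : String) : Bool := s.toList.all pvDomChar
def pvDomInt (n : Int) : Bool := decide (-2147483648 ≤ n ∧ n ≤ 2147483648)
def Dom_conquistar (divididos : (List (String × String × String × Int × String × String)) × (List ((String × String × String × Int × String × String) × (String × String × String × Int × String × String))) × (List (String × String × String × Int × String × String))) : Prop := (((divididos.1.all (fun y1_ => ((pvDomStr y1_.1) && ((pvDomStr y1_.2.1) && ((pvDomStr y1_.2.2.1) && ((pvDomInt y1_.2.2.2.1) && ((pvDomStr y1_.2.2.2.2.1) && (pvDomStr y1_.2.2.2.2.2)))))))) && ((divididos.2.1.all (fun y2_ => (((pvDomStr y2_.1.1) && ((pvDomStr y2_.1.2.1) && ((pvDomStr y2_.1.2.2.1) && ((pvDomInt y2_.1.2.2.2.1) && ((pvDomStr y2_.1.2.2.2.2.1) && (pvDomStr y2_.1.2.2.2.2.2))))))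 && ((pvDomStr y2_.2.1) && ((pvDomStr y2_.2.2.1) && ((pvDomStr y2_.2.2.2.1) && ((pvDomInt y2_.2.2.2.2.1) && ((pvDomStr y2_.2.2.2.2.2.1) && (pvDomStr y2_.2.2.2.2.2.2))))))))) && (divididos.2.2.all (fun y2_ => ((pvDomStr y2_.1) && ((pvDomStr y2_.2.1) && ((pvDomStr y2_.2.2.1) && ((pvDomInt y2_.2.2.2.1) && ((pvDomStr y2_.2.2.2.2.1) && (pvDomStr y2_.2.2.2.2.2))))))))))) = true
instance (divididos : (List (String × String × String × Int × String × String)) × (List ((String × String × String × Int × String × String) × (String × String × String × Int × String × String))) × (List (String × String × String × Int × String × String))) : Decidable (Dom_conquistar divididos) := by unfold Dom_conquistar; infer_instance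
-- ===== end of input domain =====

-- ===== PORT A =====
-- header: B replaces A's destructive pop-based while-loop (appending to the
-- outputs as it goes) by two staged passes: a non-destructive used-mask scan
-- producing one event per consumed person, then a split of the event list
-- (objective: alternative).  A empties the personasEmparejables list in place;
-- equivalence here is about the RETURN value.
def matchea (persona pretendiente : String × String × String × Int × String × String) : Bool :=
  match persona, pretendiente with
  | (_, _, pLoc, pEdad, pGen, pGdi), (_, _, cLoc, cEdad, cGen, cGdi) =>
    cLoc == pLoc
      && (pGdi == "A" || cGen == pGdi)
      && (cGdi == "A" || pGen == cGdi)
      && ((decide (pEdad ≥ 18) && decide (cEdad ≥ 18)) || (decide (pEdad < 18) && decide (cEdad < 18)))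

-- inner 'for (i, candidato) in enumerate(...)' loop of A: first matching index and element
def buscar (p : String × String × String × Int × String × String)
    (l : List (String × String × String × Int × String × String)) :
    Option (Nat × (String × String × String × Int × String × String)) :=
  match l with
  | [] => none
  | c :: t => if matchea p c then some (0, c) else (buscar p t).map (fun ic => (ic.1 + 1, ic.2))

-- A's while-loop: pop front, find first compatible candidate, pop it / segregate
def goA (seg : List (String × String × String × Int × String × String))
    (par : List ((String × String × String × Int × String × String) × (String × String × String × Int × String × String)))
    (people : List (String × String × String × Int × String × String)) :
    (List (String × String × String × Int × String × String)) × (List ((String × String × String × Int × String × String) × (String × String × String × Int × String × String))) :=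
  match people with
  | [] => (seg, par)
  | p :: rest =>
    match buscar p rest with
    | some (i, c) => goA seg (par ++ [(p, c)]) (rest.eraseIdx i)
    | none => goA (seg ++ [p]) par rest
termination_by people.length
decreasing_by
  · exact Nat.lt_succ_of_le (List.length_eraseIdx_le rest i)
  · simp

def conquistar (divididos : (List (String × String × String × Int × String × String)) × (List ((String × String × String × Int × String × String) × (String × String × String × Int × String × String))) × (List (String × String × String × Int × String × String))) : (List (String × String × String × Int × String × String)) × (List ((String × String × String × Int × String × String) × (String × String × String × Int × String × String))) :=
  goA divididos.1 divididos.2.1 divididos.2.2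

-- ===== PORT B =====
abbrev Person := String × String × String × Int × String × String

def compatible (p c : Person) : Bool :=
  c.2.2.1 == p.2.2.1
    && (p.2.2.2.2.2 == "A" || c.2.2.2.2.1 == p.2.2.2.2.2)
    && (c.2.2.2.2.2 == "A" || p.2.2.2.2.1 == c.2.2.2.2.2)
    && (decide (p.2.2.2.1 ≥ 18) == decide (c.2.2.2.1 ≥ 18))

-- pass-1 inner loop over 'tagged[k+1:]': flip the used flag of the first
-- unused compatible cell and report its person
def markMate (p : Person) (cells : List (Person × Bool)) :
    Option (List (Person × Bool) × Person) :=
  match cells with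
  | [] => none
  | (q, u) :: t =>
    if !u && compatible p q then some ((q, true) :: t, q)
    else (markMate p t).map (fun r => ((q, u) :: r.1, r.2))

theorem markMate_length (p : Person) (cells : List (Person × Bool))
    {r} (h : markMate p cells = some r) : r.1.length = cells.length := by
  induction cells generalizing r with
  | nil => simp [markMate] at h
  | cons a t ih =>
    obtain ⟨q, u⟩ := a
    simp only [markMate] at h
    split at h
    · cases h; simp
    · simp only [Option.map_eq_some_iff] at h
      obtain ⟨r', hr', rfl⟩ := h
      simpa using ih hr'

-- pass 1: one (person, partner-or-None) event per person not consumed as a partner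
def eventsOf (tagged : List (Person × Bool)) : List (Person × Option Person) :=
  match tagged with
  | [] => []
  | (_, true) :: t => eventsOf t
  | (p, false) :: t =>
    match h : markMate p t with
    | some r => (p, some r.2) :: eventsOf r.1
    | none => (p, none) :: eventsOf t
termination_by tagged.length
decreasing_by
  · simp
  · simp [markMate_length p t h]
  · simp

def conquistar_alt (divididos : (List (String × String × String × Int × String × String)) × (List ((String × String × String × Int × String × String) × (String × String × String × Int × String × String))) × (List (String × String × String × Int × String × String))) : (List (String × String × String × Int × String × String)) × (List ((String × String × String × Int × String × String) × (String × String × String × Int × String × String))) :=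
  let ev := eventsOf (divididos.2.2.map (fun p => (p, false)))
  (divididos.1 ++ ev.filterMap (fun e => match e.2 with | none => some e.1 | some _ => none),
   divididos.2.1 ++ ev.filterMap (fun e => e.2.map (fun q => (e.1, q))))

-- ===== PRECONDITION & SPEC =====
def Spec_conquistar (divididos : (List (String × String × String × Int × String × String)) × (List ((String × String × String × Int × String × String) × (String × String × String × Int × String × String))) × (List (String × String × String × Int × String × String))) (out : (List (String × String × String × Int × String × String)) × (List ((String × String × String × Int × String × String) × (String × String × String × Int × String × String)))) : Prop := out = conquistar_alt divididos
instance (divididos : (List (String × String × String × Int × String × String)) × (List ((String × String × String × Int × String × String) × (String × String × String × Int × String × String))) × (List (String × String × String × Int × String × String))) (out : (List (String × String × String × Int × String × String)) × (List ((String × String × String × Int × String × String) × (String × String × String × Int × String × String)))) : Decidable (Spec_conquistar divididos out) := by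
  unfold Spec_conquistar
  have e : DecidableEq (String × String × String × Int × String × String) := inferInstance
  have p : DecidableEq ((String × String × String × Int × String × String) × (String × String × String × Int × String × String)) := @instDecidableEqProd _ _ e e
  exact @instDecidableEqProd _ _ (@instDecidableEqList _ e) (@instDecidableEqList _ p) out (conquistar_alt divididos)

-- ===== CLAIM (what is proved, stated in full; the proofs are below) =====
def Claim_equal_conquistar : Prop := ∀ (divididos : (List (String × String × String × Int × String × String)) × (List ((String × String × String × Int × String × String) × (String × String × String × Int × String × String))) × (List (String × String × String × Int × String × String))), Dom_conquistar divididos → Spec_conquistar divididos (conquistar divididos)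

-- ===== LEMMAS AND PROOFS =====

-- the two compatibility predicates agree
theorem matchea_eq_compatible (p c : Person) : matchea p c = compatible p c := by
  obtain ⟨a1, a2, pLoc, pEdad, pGen, pGdi⟩ := p
  obtain ⟨b1, b2, cLoc, cEdad, cGen, cGdi⟩ := c
  simp only [matchea, compatible]
  by_cases h1 : (18:Int) ≤ pEdad <;> by_cases h2 : (18:Int) ≤ cEdad <;>
    simp [h1, h2, lt_of_not_ge, not_lt.mpr]

-- the people still in play on B's side: cells whose 'used' flag is off
def unused (l : List (Person × Bool)) : List Person :=
  (l.filter (fun x => !x.2)).map Prod.fst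

theorem unused_cons_true (q : Person) (t : List (Person × Bool)) :
    unused ((q, true) :: t) = unused t := by
  simp [unused]

theorem unused_cons_false (q : Person) (t : List (Person × Bool)) :
    unused ((q, false) :: t) = q :: unused t := by
  simp [unused]

-- marking the first unused compatible cell corresponds exactly to A's
-- buscar-and-eraseIdx on the list of still-unused people
theorem markMate_spec (p : Person) (l : List (Person × Bool)) :
    (markMate p l = none → buscar p (unused l) = none) ∧
    (∀ r, markMate p l = some r →
      ∃ i, buscar p (unused l) = some (i, r.2) ∧ (unused l).eraseIdx i = unused r.1) := by
  induction l with
  | nil => simp [markMate, unused, buscar]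
  | cons a t ih =>
    obtain ⟨q, u⟩ := a
    cases u with
    | true =>
      constructor
      · intro h
        simp only [markMate, Bool.not_true, Bool.false_and, Bool.false_eq_true, if_false,
          Option.map_eq_none_iff] at h
        rw [unused_cons_true]
        exact ih.1 h
      · intro r h
        simp only [markMate, Bool.not_true, Bool.false_and, Bool.false_eq_true, if_false,
          Option.map_eq_some_iff] at h
        obtain ⟨r', hr', rfl⟩ := h
        obtain ⟨i, hi, he⟩ := ih.2 r' hr'
        exact ⟨i, by rw [unused_cons_true]; exact hi, by rw [unused_cons_true, unused_cons_true]; exact he⟩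
    | false =>
      by_cases hm : compatible p q = true
      · constructor
        · intro h; simp [markMate, hm] at h
        · intro r h
          simp only [markMate, Bool.not_false, Bool.true_and, hm, if_true] at h
          cases h
          refine ⟨0, ?_, ?_⟩
          · rw [unused_cons_false]; simp [buscar, matchea_eq_compatible, hm]
          · rw [unused_cons_false, unused_cons_true]; simp
      · constructor
        · intro h
          simp only [markMate, Bool.not_false, Bool.true_and, hm, Bool.false_eq_true, if_false,
            Option.map_eq_none_iff] at h
          rw [unused_cons_false]
          simp [buscar, matchea_eq_compatible, hm, ih.1 h]
        · intro r h
          simp only [markMate, Bool.not_false, Bool.true_and, hm, Bool.false_eq_true, if_false,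
            Option.map_eq_some_iff] at h
          obtain ⟨r', hr', rfl⟩ := h
          obtain ⟨i, hi, he⟩ := ih.2 r' hr'
          refine ⟨i + 1, ?_, ?_⟩
          · rw [unused_cons_false]; simp [buscar, matchea_eq_compatible, hm, hi]
          · rw [unused_cons_false, unused_cons_false, List.eraseIdx_cons_succ, he]

-- unfolding equations for eventsOf (its match remembers the scrutinee, so simp cannot)
theorem eventsOf_some (p : Person) (t : List (Person × Bool)) (r : List (Person × Bool) × Person)
    (h : markMate p t = some r) :
    eventsOf ((p, false) :: t) = (p, some r.2) :: eventsOf r.1 := by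
  rw [eventsOf.eq_def]
  split
  · simp_all
  · simp_all
  · rename_i p' t' heq
    injection heq with h1 h2
    injection h1 with hp _
    subst hp; subst h2
    split
    · rename_i r' heq2; rw [h] at heq2; cases heq2; rfl
    · rename_i heq2; rw [h] at heq2; cases heq2

theorem eventsOf_none (p : Person) (t : List (Person × Bool))
    (h : markMate p t = none) :
    eventsOf ((p, false) :: t) = (p, none) :: eventsOf t := by
  rw [eventsOf.eq_def]
  split
  · simp_all
  · simp_all
  · rename_i p' t' heq
    injection heq with h1 h2
    injection h1 with hp _
    subst hp; subst h2
    split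
    · rename_i r' heq2; rw [h] at heq2; cases heq2
    · rfl

-- how pass 2 reads an event list
def segsOf (ev : List (Person × Option Person)) : List Person :=
  ev.filterMap (fun e => match e.2 with | none => some e.1 | some _ => none)

def parsOf (ev : List (Person × Option Person)) : List (Person × Person) :=
  ev.filterMap (fun e => e.2.map (fun q => (e.1, q)))

-- main invariant: A's loop on the still-unused people produces exactly
-- the accumulated outputs extended by B's event list, split
theorem goA_eventsOf (tagged : List (Person × Bool)) :
    ∀ seg par, goA seg par (unused tagged) =
      (seg ++ segsOf (eventsOf tagged), par ++ parsOf (eventsOf tagged)) := by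
  induction tagged using eventsOf.induct with
  | case1 => simp [unused, goA, eventsOf, segsOf, parsOf]
  | case2 q t ih => intro seg par; rw [unused_cons_true, eventsOf]; exact ih seg par
  | case3 p t r h ih =>
    intro seg par
    obtain ⟨i, hi, he⟩ := (markMate_spec p t).2 r h
    rw [unused_cons_false, goA]
    simp only [hi, he]
    rw [ih seg (par ++ [(p, r.2)]), eventsOf_some p t r h]
    simp [segsOf, parsOf]
  | case4 p t h ih =>
    intro seg par
    rw [unused_cons_false, goA]
    simp only [(markMate_spec p t).1 h]
    rw [ih (seg ++ [p]) par, eventsOf_none p t h]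
    simp [segsOf, parsOf]

theorem unused_map_false (l : List Person) :
    unused (l.map (fun p => (p, false))) = l := by
  induction l with
  | nil => rfl
  | cons a t ih => simpa [unused_cons_false] using ih

-- ===== VERDICT (by name: the statement is the Claim_ definition above) =====
theorem conquistar_spec : Claim_equal_conquistar := by
  intro d _
  have h := goA_eventsOf (d.2.2.map (fun p => (p, false))) d.1 d.2.1
  rw [unused_map_false] at h
  unfold Spec_conquistar conquistar conquistar_alt
  simpa [segsOf, parsOf] using h
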